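-- pv_equiv track=rewrite | github.com/CristianRV8/practicall | reach.py | remove_useless_adjacencies
-- ===== SOURCE A (Python) =====
-- def remove_useless_adjacencies(adjacenciy_list):
--   final_list = []
--   for i in adjacenciy_list:
--     count_0 = i.count(0)
--     for j in range(count_0):
--       i.remove(0)
--     final_list.append(i)
--   return final_list
-- ===== SOURCE B (Python) =====
-- def remove_useless_adjacencies(adjacenciy_list):
--   for i in adjacenciy_list:
--     i[:] = [x for x in i if x != 0]
--   return adjacenciy_list
-- ===== Notes on version B (the rewrite author's own statement) =====
-- stated objective: simpler
-- what changed: Replaces the count-then-repeated-remove(0) loop per sublist with a single filtering pass written back in place via slice assignment, mutating the same list objects.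
import Mathlib
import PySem

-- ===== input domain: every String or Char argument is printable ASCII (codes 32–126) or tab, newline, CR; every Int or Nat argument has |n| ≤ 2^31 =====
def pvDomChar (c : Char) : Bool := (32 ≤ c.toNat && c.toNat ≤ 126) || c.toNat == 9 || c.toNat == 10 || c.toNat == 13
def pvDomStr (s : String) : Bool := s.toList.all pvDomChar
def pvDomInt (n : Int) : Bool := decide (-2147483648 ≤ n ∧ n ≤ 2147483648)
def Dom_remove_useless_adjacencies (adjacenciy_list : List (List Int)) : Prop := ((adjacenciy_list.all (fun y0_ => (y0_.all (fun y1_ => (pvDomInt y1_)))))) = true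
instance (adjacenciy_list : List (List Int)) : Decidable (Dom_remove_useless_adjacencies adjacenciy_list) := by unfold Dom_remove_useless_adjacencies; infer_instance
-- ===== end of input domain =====

-- B replaces A's count-then-repeated-remove(0) per sublist with one filtering pass
-- written back in place (same mutation of the argument's sublists); equivalence proved
-- for the RETURN value. Objective: simpler.

-- ===== PORT A =====
-- i.remove(0): A only calls it count(0) times, so it never raises; getD is the unreached branch.
def remove_useless_adjacencies (adjacenciy_list : List (List Int)) : List (List Int) :=
  adjacenciy_list.foldl (fun final_list i =>
    let count_0 : Nat := PySem.List.count i 0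
    let i' := (PySem.List.pyRange 0 (count_0 : Int) 1).foldl
      (fun acc _ => (PySem.List.remove? acc 0).getD acc) i
    final_list ++ [i']) []

-- ===== PORT B =====
def remove_useless_adjacencies_alt (adjacenciy_list : List (List Int)) : List (List Int) :=
  adjacenciy_list.map (fun i => i.filter (fun x => x != 0))

-- ===== PRECONDITION & SPEC =====
def Spec_remove_useless_adjacencies (adjacenciy_list : List (List Int)) (out : List (List Int)) : Prop := out = remove_useless_adjacencies_alt adjacenciy_list
instance (adjacenciy_list : List (List Int)) (out : List (List Int)) : Decidable (Spec_remove_useless_adjacencies adjacenciy_list out) := by unfold Spec_remove_useless_adjacencies; infer_instance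

-- ===== CLAIM (what is proved, stated in full; the proofs are below) =====
def Claim_equal_remove_useless_adjacencies : Prop := ∀ (adjacenciy_list : List (List Int)), Dom_remove_useless_adjacencies adjacenciy_list → Spec_remove_useless_adjacencies adjacenciy_list (remove_useless_adjacencies adjacenciy_list)

-- ===== LEMMAS AND PROOFS =====

-- one step of A's inner loop
def pvRemStep (acc : List Int) : List Int := (PySem.List.remove? acc 0).getD acc

theorem pvRemStep_cons_ne (a : Int) (t : List Int) (ha : a ≠ 0) :
    pvRemStep (a :: t) = a :: pvRemStep t := by
  unfold pvRemStep
  rw [PySem.List.remove?_cons_of_ne t ha]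
  cases PySem.List.remove? t 0 <;> simp

-- a foldl that ignores its elements is iteration
theorem pvFoldl_const {α β : Type} (f : α → α) (l : List β) (x : α) :
    l.foldl (fun acc _ => f acc) x = f^[l.length] x := by
  induction l generalizing x with
  | nil => rfl
  | cons b t ih => simp [List.foldl, ih, Function.iterate_succ_apply]

theorem pvIter_cons_ne (n : Nat) (a : Int) (t : List Int) (ha : a ≠ 0) :
    pvRemStep^[n] (a :: t) = a :: pvRemStep^[n] t := by
  induction n generalizing t with
  | zero => rfl
  | succ m ih =>
      rw [Function.iterate_succ_apply, Function.iterate_succ_apply,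
        pvRemStep_cons_ne a t ha, ih]

theorem pvIter_count_eq_filter (i : List Int) :
    pvRemStep^[i.count 0] i = i.filter (fun x => x != 0) := by
  induction i with
  | nil => rfl
  | cons a t ih =>
      by_cases ha : a = 0
      · subst ha
        rw [List.count_cons_self, Function.iterate_succ_apply]
        have hstep : pvRemStep (0 :: t) = t := by
          unfold pvRemStep; simp
        rw [hstep, ih]
        simp
      · rw [List.count_cons_of_ne ha, pvIter_cons_ne _ _ _ ha, ih]
        simp [ha]

-- ===== VERDICT (by name: the statement is the Claim_ definition above) =====
theorem remove_useless_adjacencies_spec : Claim_equal_remove_useless_adjacencies := by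
  intro l hdom
  clear hdom
  unfold Spec_remove_useless_adjacencies remove_useless_adjacencies remove_useless_adjacencies_alt
  have hbody : ∀ i : List Int,
      (PySem.List.pyRange 0 ((PySem.List.count i 0 : Nat) : Int) 1).foldl
        (fun acc _ => (PySem.List.remove? acc 0).getD acc) i
      = i.filter (fun x => x != 0) := by
    intro i
    have h1 : (PySem.List.pyRange 0 ((PySem.List.count i 0 : Nat) : Int) 1).foldl
        (fun acc _ => (PySem.List.remove? acc 0).getD acc) i
        = pvRemStep^[(PySem.List.pyRange 0 ((PySem.List.count i 0 : Nat) : Int) 1).length] i :=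
      pvFoldl_const pvRemStep _ i
    rw [h1, PySem.List.length_pyRange_one]
    have hlen : (((PySem.List.count i 0 : Nat) : Int) - 0).toNat = i.count 0 := by
      simp [PySem.List.count]
    rw [hlen, pvIter_count_eq_filter]
  have : ∀ (acc : List (List Int)),
      l.foldl (fun final_list i =>
        final_list ++ [(PySem.List.pyRange 0 ((PySem.List.count i 0 : Nat) : Int) 1).foldl
          (fun acc _ => (PySem.List.remove? acc 0).getD acc) i]) acc
      = acc ++ l.map (fun i => i.filter (fun x => x != 0)) := by
    induction l with
    | nil => intro acc; simp
    | cons a t ih =>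
        intro acc
        simp only [List.foldl, List.map]
        rw [ih, hbody a]
        simp
  simpa using this []
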